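-- pv_equiv track=rewrite | github.com/RascalTwo/DailyProblem | problems/DailyCoding/221/solve.py | solve
-- ===== SOURCE A (Python) =====
-- import itertools
-- from typing import List
--
-- def solve(n: int) -> int:
-- 	sevens: List[int] = []
-- 	powers: List[int] = []
-- 	while len(sevens) < n + 1:
-- 		powers.append(7**len(powers))
-- 		sevens.append(powers[-1])
-- 		for size in range(2, len(powers) + 1):
-- 			for combination in itertools.combinations(powers, size):
-- 				if powers[-1] in combination and (considering := sum(combination)) not in sevens:
-- 					sevens.append(considering)
--
-- 	return sevens[n]
-- ===== SOURCE B (Python) =====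
-- from itertools import combinations
--
-- def solve(n: int) -> int:
-- 	sevens = [1]
-- 	k = 0
-- 	while len(sevens) <= n:
-- 		k += 1
-- 		p = 7 ** k
-- 		block = [p]
-- 		for size in range(1, k + 1):
-- 			for combo in combinations([7 ** i for i in range(k)], size):
-- 				block.append(p + sum(combo))
-- 		sevens += block
-- 	return sevens[n]
-- ===== Notes on version B (the rewrite author's own statement) =====
-- stated objective: faster
-- what changed: Instead of re-enumerating every combination of all powers each round, filtering for the one containing the newest power and deduplicating each sum against the whole output list, B appends each new block directly: the fresh power followed by the fresh power plus every combination of the strictly smaller powers, with no filter and no membership scan.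
import Mathlib
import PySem

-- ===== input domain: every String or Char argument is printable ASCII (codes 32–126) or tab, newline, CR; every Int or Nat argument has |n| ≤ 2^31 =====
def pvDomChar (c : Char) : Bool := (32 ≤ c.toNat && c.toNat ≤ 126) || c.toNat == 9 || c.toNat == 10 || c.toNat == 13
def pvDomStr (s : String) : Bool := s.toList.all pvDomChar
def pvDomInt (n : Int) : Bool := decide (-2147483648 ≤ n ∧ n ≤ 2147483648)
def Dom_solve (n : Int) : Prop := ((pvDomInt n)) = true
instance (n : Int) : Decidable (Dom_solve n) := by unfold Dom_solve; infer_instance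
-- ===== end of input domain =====

-- B generates each new block directly (the fresh power, then the fresh power plus every
-- combination of the smaller powers) instead of A's re-enumeration of all combinations of all
-- powers with a filter and a membership scan against the whole output list (measurably faster).

-- ===== PORT A =====
-- the double 'for size … for combination …' loop of A's while-body
def innerA (sevens powers : List Int) : List Int :=
  (PySem.List.pyRange 2 ((powers.length : Int) + 1) 1).foldl
    (fun sv s =>
      (PySem.List.combinations powers s.toNat).foldl
        (fun sv c =>
          if (PySem.List.pyGet? powers (-1)).getD 0 ∈ c ∧ c.sum ∉ sv then sv ++ [c.sum]
          else sv)
        sv)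
    sevens

-- A's while loop (fuel n.toNat + 1 suffices: every iteration appends at least one element)
def loopA : Nat → Int → List Int → List Int → List Int
  | 0, _, sevens, _ => sevens
  | f+1, n, sevens, powers =>
    if (sevens.length : Int) < n + 1 then
      let powers' := powers ++ [(7:Int) ^ powers.length]
      let sevens' := sevens ++ [(PySem.List.pyGet? powers' (-1)).getD 0]
      loopA f n (innerA sevens' powers') powers'
    else sevens

def solve (n : Int) : Int :=
  (PySem.List.pyGet? (loopA (n.toNat + 1) n [] []) n).getD 0

-- ===== PORT B =====
-- B's while loop (fuel n.toNat suffices: every iteration appends at least two elements)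
def loopB : Nat → Int → List Int → Nat → List Int
  | 0, _, sevens, _ => sevens
  | f+1, n, sevens, k =>
    if (sevens.length : Int) ≤ n then
      let k' := k + 1
      let p : Int := 7 ^ k'
      let block :=
        (PySem.List.pyRange 1 ((k' : Int) + 1) 1).foldl
          (fun bl s =>
            (PySem.List.combinations ((List.range k').map (fun i => (7:Int) ^ i)) s.toNat).foldl
              (fun bl c => bl ++ [p + c.sum]) bl)
          [p]
      loopB f n (sevens ++ block) k'
    else sevens

def solve_alt (n : Int) : Int :=
  (PySem.List.pyGet? (loopB n.toNat n [1] 0) n).getD 0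

-- ===== PRECONDITION & SPEC =====
-- Pre_ excludes exactly the negative inputs, on which A raises IndexError (sevens is empty there).
def Pre_solve (n : Int) : Prop := 0 ≤ n
instance (n : Int) : Decidable (Pre_solve n) := by unfold Pre_solve; infer_instance
def pvWitness_solve : Int := 3

def Spec_solve (n : Int) (out : Int) : Prop := out = solve_alt n
instance (n : Int) (out : Int) : Decidable (Spec_solve n out) := by unfold Spec_solve; infer_instance

-- ===== CLAIM (what is proved, stated in full; the proofs are below) =====
def Claim_equal_solve : Prop := ∀ (n : Int), Dom_solve n → Pre_solve n → Spec_solve n (solve n)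

-- ===== LEMMAS AND PROOFS =====

-- the list [7^0, …, 7^(m-1)] of powers maintained by A (and rebuilt each round by B)
def pows (m : Nat) : List Int := (List.range m).map (fun i => (7:Int) ^ i)

-- all sums appended in the round that introduces 7^(k+1), in generation order
def SUMS (k : Nat) : List Int :=
  (List.range (k+1)).flatMap
    (fun j => (PySem.List.combinations (pows (k+1)) (j+1)).map (fun c => c.sum + 7^(k+1)))

lemma pows_succ (m : Nat) : pows (m+1) = pows m ++ [(7:Int) ^ m] := by
  simp [pows, List.range_succ]

lemma pows_length (m : Nat) : (pows m).length = m := by simp [pows]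

lemma mem_pows_bounds {m : Nat} {x : Int} (hx : x ∈ pows m) : 1 ≤ x ∧ x < 7 ^ m := by
  simp only [pows, List.mem_map, List.mem_range] at hx
  obtain ⟨i, hi, rfl⟩ := hx
  exact ⟨one_le_pow₀ (by norm_num), pow_lt_pow_right₀ (by norm_num) hi⟩

lemma pows_sum_lt (m : Nat) : (pows m).sum < 7 ^ m := by
  induction m with
  | zero => simp [pows]
  | succ m ih =>
    rw [pows_succ, List.sum_append]
    simp only [List.sum_cons, List.sum_nil, add_zero]
    have : (7:Int) ^ (m+1) = 7 * 7 ^ m := by ring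
    nlinarith [pow_pos (show (0:Int) < 7 by norm_num) m]

lemma sublist_sum_nonneg {m : Nat} {c : List Int} (h : c.Sublist (pows m)) : 0 ≤ c.sum :=
  List.sum_nonneg (fun _ hx => le_trans zero_le_one (mem_pows_bounds (h.mem hx)).1)

lemma sublist_sum_lt {m : Nat} {c : List Int} (h : c.Sublist (pows m)) : c.sum < 7 ^ m :=
  lt_of_le_of_lt (List.Sublist.sum_le_sum h
    (fun _ hx => le_trans zero_le_one (mem_pows_bounds hx).1)) (pows_sum_lt m)

lemma sublist_sum_pos {m : Nat} {c : List Int} (h : c.Sublist (pows m)) (hne : c ≠ []) :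
    0 < c.sum :=
  List.sum_pos c (fun _ hx => lt_of_lt_of_le one_pos (mem_pows_bounds (h.mem hx)).1) hne

-- distinct sub-multisets of [7^0, …, 7^(m-1)] have distinct sums
lemma subset_sum_inj : ∀ (m : Nat) {c d : List Int}, c.Sublist (pows m) → d.Sublist (pows m) →
    c.sum = d.sum → c = d := by
  intro m
  induction m with
  | zero =>
    intro c d hc hd _
    simp [pows] at hc hd
    rw [hc, hd]
  | succ m ih =>
    intro c d hc hd hsum
    rw [pows_succ] at hc hd
    obtain ⟨a, b, rfl, ha, hb⟩ := List.sublist_append_iff.mp hc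
    obtain ⟨a', b', rfl, ha', hb'⟩ := List.sublist_append_iff.mp hd
    rcases List.sublist_singleton.mp hb with rfl | rfl <;>
      rcases List.sublist_singleton.mp hb' with rfl | rfl <;>
      simp only [List.append_nil, List.sum_append, List.sum_cons, List.sum_nil, add_zero] at hsum ⊢
    · rw [ih ha ha' hsum]
    · exfalso
      have h1 := sublist_sum_lt ha
      have h2 := sublist_sum_nonneg ha'
      omega
    · exfalso
      have h1 := sublist_sum_lt ha'
      have h2 := sublist_sum_nonneg ha
      omega
    · rw [ih ha ha' (by omega)]

-- CPython enumerates the combinations of xs ++ [x] that contain the (fresh) last element x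
-- exactly as 'each combination of xs, with x appended'
lemma comb_filter_last {α : Type} [DecidableEq α] :
    ∀ (xs : List α) (x : α), x ∉ xs → ∀ (s : Nat),
    (PySem.List.combinations (xs ++ [x]) (s+1)).filter (fun c => decide (x ∈ c)) =
      (PySem.List.combinations xs s).map (· ++ [x]) := by
  intro xs
  induction xs with
  | nil =>
    intro x _ s
    cases s with
    | zero =>
      simp [PySem.List.combinations_cons_succ, PySem.List.combinations_zero,
        PySem.List.combinations_nil_succ]
    | succ s =>
      simp [PySem.List.combinations_cons_succ, PySem.List.combinations_nil_succ]
  | cons y ys ih =>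
    intro x hx s
    have hxy : x ≠ y := by simp at hx; tauto
    have hxys : x ∉ ys := by simp at hx; tauto
    rw [show (y :: ys) ++ [x] = y :: (ys ++ [x]) by simp,
      PySem.List.combinations_cons_succ, List.filter_append, List.filter_map]
    have hcomp : (fun c => decide (x ∈ c)) ∘ (fun c => y :: c) = fun c => decide (x ∈ c) := by
      funext c; simp [hxy]
    rw [hcomp]
    cases s with
    | zero =>
      rw [PySem.List.combinations_zero]
      simp only [List.filter]
      rw [ih x hxys 0]
      simp [PySem.List.combinations_zero]
    | succ s =>
      rw [ih x hxys s, ih x hxys (s+1), PySem.List.combinations_cons_succ, List.map_append,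
        List.map_map, List.map_map]
      congr 1

lemma comb_nodup {α : Type} :
    ∀ (xs : List α), xs.Nodup → ∀ (r : Nat), (PySem.List.combinations xs r).Nodup := by
  intro xs
  induction xs with
  | nil =>
    intro _ r
    cases r <;> simp [PySem.List.combinations_zero, PySem.List.combinations_nil_succ]
  | cons y ys ih =>
    intro hnd r
    have hy : y ∉ ys := (List.nodup_cons.mp hnd).1
    have hys : ys.Nodup := (List.nodup_cons.mp hnd).2
    cases r with
    | zero => simp [PySem.List.combinations_zero]
    | succ r =>
      rw [PySem.List.combinations_cons_succ]
      apply List.Nodup.append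
      · exact (ih hys r).map (fun a b h => by injection h)
      · exact ih hys (r+1)
      · intro c hc1 hc2
        obtain ⟨c', _, rfl⟩ := List.mem_map.mp hc1
        have := (PySem.List.mem_combinations_iff _ _ _).mp hc2
        exact hy (this.1.mem (by simp))

lemma pows_nodup (m : Nat) : (pows m).Nodup := by
  apply List.Nodup.map_on _ (List.nodup_range)
  intro i hi j hj hij
  simp only [List.mem_range] at hi hj
  by_contra hne
  rcases Nat.lt_or_ge i j with h | h
  · exact absurd hij (ne_of_lt (pow_lt_pow_right₀ (by norm_num) h))
  · have : j < i := lt_of_le_of_ne h (Ne.symm hne)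
    exact absurd hij.symm (ne_of_lt (pow_lt_pow_right₀ (by norm_num) this))

lemma SUMS_bounds {k : Nat} {x : Int} (hx : x ∈ SUMS k) :
    7 ^ (k+1) < x ∧ x < 7 ^ (k+2) := by
  simp only [SUMS, List.mem_flatMap, List.mem_map, List.mem_range] at hx
  obtain ⟨j, hj, c, hc, rfl⟩ := hx
  obtain ⟨hsub, hlen⟩ := (PySem.List.mem_combinations_iff _ _ _).mp hc
  have hne : c ≠ [] := by intro h; rw [h] at hlen; simp at hlen
  have h1 := sublist_sum_pos hsub hne
  have h2 := sublist_sum_lt hsub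
  constructor
  · omega
  · have : (7:Int) ^ (k+2) = 7 ^ (k+1) * 7 := by ring
    nlinarith [pow_pos (show (0:Int) < 7 by norm_num) (k+1)]

lemma SUMS_nodup (k : Nat) : (SUMS k).Nodup := by
  have hflat : ∀ (t : Nat), ((List.range t).flatMap
      (fun j => PySem.List.combinations (pows (k+1)) (j+1))).Nodup := by
    intro t
    induction t with
    | zero => simp
    | succ m ih =>
      rw [List.range_succ, List.flatMap_append]
      apply List.Nodup.append ih
      · simp only [List.flatMap_cons, List.flatMap_nil, List.append_nil]
        exact comb_nodup _ (pows_nodup _) _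
      · intro c hc1 hc2
        simp only [List.mem_flatMap, List.mem_range] at hc1
        simp only [List.flatMap_cons, List.flatMap_nil, List.append_nil] at hc2
        obtain ⟨j, hj, hc⟩ := hc1
        have l1 := ((PySem.List.mem_combinations_iff _ _ _).mp hc).2
        have l2 := ((PySem.List.mem_combinations_iff _ _ _).mp hc2).2
        omega
  have : SUMS k = ((List.range (k+1)).flatMap
      (fun j => PySem.List.combinations (pows (k+1)) (j+1))).map (fun c => c.sum + 7^(k+1)) := by
    simp [SUMS, List.map_flatMap]
  rw [this]
  apply List.Nodup.map_on _ (hflat (k+1))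
  intro c hc d hd heq
  simp only [List.mem_flatMap, List.mem_range] at hc hd
  obtain ⟨j1, _, hc⟩ := hc
  obtain ⟨j2, _, hd⟩ := hd
  exact subset_sum_inj (k+1) ((PySem.List.mem_combinations_iff _ _ _).mp hc).1
    ((PySem.List.mem_combinations_iff _ _ _).mp hd).1 (by omega)

-- A's 'if … not in sevens: append' loop is a plain append when every element is fresh
lemma foldl_fresh : ∀ (L acc : List Int), L.Nodup → (∀ x ∈ L, x ∉ acc) →
    L.foldl (fun a x => if x ∉ a then a ++ [x] else a) acc = acc ++ L := by
  intro L
  induction L with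
  | nil => simp
  | cons x t ih =>
    intro acc hnd hfresh
    have hx : x ∉ acc := hfresh x (by simp)
    simp only [List.foldl_cons, if_pos hx]
    rw [ih (acc ++ [x]) (List.nodup_cons.mp hnd).2]
    · simp
    · intro z hz
      simp only [List.mem_append, List.mem_singleton]
      rintro (h | rfl)
      · exact hfresh z (by simp [hz]) h
      · exact (List.nodup_cons.mp hnd).1 hz

lemma getLast_pyGet {α : Type} [Inhabited α] (xs : List α) (a d : α) :
    (PySem.List.pyGet? (xs ++ [a]) (-1)).getD d = a := by
  simp [PySem.List.pyGet?, PySem.List.pyIdx?]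

lemma innerA_eq (k : Nat) (S : List Int) (hS : ∀ x ∈ S, x < 7 ^ (k+1)) :
    innerA (S ++ [(7:Int) ^ (k+1)]) (pows (k+2)) = S ++ [(7:Int) ^ (k+1)] ++ SUMS k := by
  have hplast : (PySem.List.pyGet? (pows (k+2)) (-1)).getD 0 = (7:Int)^(k+1) := by
    rw [pows_succ]; exact getLast_pyGet _ _ _
  have hnot : (7:Int)^(k+1) ∉ pows (k+1) := by
    intro h
    exact absurd (mem_pows_bounds h).2 (lt_irrefl _)
  unfold innerA
  rw [hplast, pows_length, PySem.List.pyRange_one]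
  have h1 : ((((k+2 : Nat)) : Int) + 1 - 2).toNat = k + 1 := by omega
  rw [h1, List.foldl_map]
  rw [PySem.List.foldl_congr_mem
    (g := fun sv j => ((PySem.List.combinations (pows (k+1)) (j+1)).map
      (fun c => c.sum + (7:Int)^(k+1))).foldl
        (fun a x => if x ∉ a then a ++ [x] else a) sv)]
  · rw [← List.foldl_flatMap]
    exact foldl_fresh (SUMS k) _ (SUMS_nodup k) (fun x hx => by
      have hb := (SUMS_bounds hx).1
      simp only [List.mem_append, List.mem_singleton]
      rintro (h | rfl)
      · exact absurd hb (not_lt.mpr (le_of_lt (hS x h)))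
      · exact absurd hb (lt_irrefl _))
  · intro sv j hj
    have ht : ((2:Int) + (j:Int)).toNat = (j+1) + 1 := by omega
    rw [ht]
    have hfun : (fun (sv c : List Int) =>
        if (7:Int)^(k+1) ∈ c ∧ c.sum ∉ sv then sv ++ [c.sum] else sv) =
        fun sv c => if (7:Int)^(k+1) ∈ c then
          (if c.sum ∉ sv then sv ++ [c.sum] else sv) else sv := by
      funext sv c
      by_cases h1 : (7:Int)^(k+1) ∈ c <;> by_cases h2 : c.sum ∉ sv <;> simp [h1, h2]
    rw [hfun]
    rw [PySem.List.foldl_ite_eq_foldl_filter (p := fun c => (7:Int)^(k+1) ∈ c)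
      (f := fun sv (c : List Int) => if c.sum ∉ sv then sv ++ [c.sum] else sv)]
    rw [pows_succ, comb_filter_last (pows (k+1)) _ hnot (j+1), List.foldl_map]
    have hfun2 : (fun (sv : List Int) (c : List Int) =>
        if (c ++ [(7:Int)^(k+1)]).sum ∉ sv then sv ++ [(c ++ [(7:Int)^(k+1)]).sum] else sv) =
        fun sv c => if (c.sum + (7:Int)^(k+1)) ∉ sv then sv ++ [c.sum + (7:Int)^(k+1)] else sv := by
      funext sv c
      simp [List.sum_append]
    rw [hfun2, ← List.foldl_map (f := fun c : List Int => c.sum + (7:Int)^(k+1))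
      (g := fun a x => if x ∉ a then a ++ [x] else a)]

lemma blockB_eq (k : Nat) :
    (PySem.List.pyRange 1 (((k+1 : Nat) : Int) + 1) 1).foldl
      (fun bl s =>
        (PySem.List.combinations ((List.range (k+1)).map (fun i => (7:Int) ^ i)) s.toNat).foldl
          (fun bl c => bl ++ [(7:Int) ^ (k+1) + c.sum]) bl)
      [(7:Int) ^ (k+1)] = (7:Int) ^ (k+1) :: SUMS k := by
  rw [PySem.List.pyRange_one]
  have h1 : ((((k+1 : Nat) : Int) + 1) - 1).toNat = k + 1 := by omega
  rw [h1, List.foldl_map]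
  rw [PySem.List.foldl_congr_mem
    (g := fun bl j => bl ++ (PySem.List.combinations (pows (k+1)) (j+1)).map
      (fun c => c.sum + (7:Int)^(k+1)))]
  · rw [PySem.List.foldl_append_eq_flatMap]
    rfl
  · intro bl j hj
    have ht : ((1:Int) + (j:Int)).toNat = j + 1 := by omega
    rw [ht]
    rw [show (List.range (k+1)).map (fun i => (7:Int)^i) = pows (k+1) from rfl]
    rw [PySem.List.foldl_append_singleton_eq_map (f := fun c : List Int => (7:Int)^(k+1) + c.sum)]
    congr 1
    apply List.map_congr_left
    intro c _
    exact add_comm _ _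

lemma loop_eq : ∀ (f : Nat) (n : Int) (S : List Int) (k : Nat),
    (∀ x ∈ S, x < 7 ^ (k+1)) → loopA f n S (pows (k+1)) = loopB f n S k := by
  intro f
  induction f with
  | zero => intro n S k _; rfl
  | succ f ih =>
    intro n S k hS
    show (if ((S.length : Int)) < n + 1 then _ else S) = (if ((S.length : Int)) ≤ n then _ else S)
    by_cases h : (S.length : Int) ≤ n
    · rw [if_pos (by omega : (S.length : Int) < n + 1), if_pos h]
      have hpow : (7:Int) ^ (pows (k+1)).length = (7:Int) ^ (k+1) := by rw [pows_length]
      have hpowers : pows (k+1) ++ [(7:Int) ^ (k+1)] = pows (k+2) := (pows_succ (k+1)).symm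
      have hlast : (PySem.List.pyGet? (pows (k+2)) (-1)).getD 0 = (7:Int) ^ (k+1) := by
        rw [pows_succ]; exact getLast_pyGet _ _ _
      simp only [hpow, hpowers, hlast]
      rw [innerA_eq k S hS, blockB_eq k]
      have hS' : ∀ x ∈ S ++ [(7:Int) ^ (k+1)] ++ SUMS k, x < 7 ^ (k+1+1) := by
        intro x hx
        have h7 : (7:Int) ^ (k+1) < 7 ^ (k+2) := pow_lt_pow_right₀ (by norm_num) (by omega)
        simp only [List.mem_append, List.mem_singleton] at hx
        rcases hx with (h1 | rfl) | h2
        · exact lt_trans (hS x h1) h7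
        · exact h7
        · exact (SUMS_bounds h2).2
      have := ih n (S ++ [(7:Int) ^ (k+1)] ++ SUMS k) (k+1) hS'
      rw [this]
      congr 1
      simp
    · rw [if_neg (by omega : ¬ ((S.length : Int)) < n + 1), if_neg h]

-- ===== VERDICT (by name: the statement is the Claim_ definition above) =====
theorem solve_spec : Claim_equal_solve := by
  unfold Claim_equal_solve
  intro n _ hpre
  unfold Pre_solve at hpre
  unfold Spec_solve solve solve_alt
  have h0 : loopA (n.toNat + 1) n [] [] = loopA n.toNat n (innerA [1] [1]) [1] := by
    rw [loopA, if_pos (by simpa using (by omega : (0:Int) < n + 1))]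
    norm_num [PySem.List.pyGet?, PySem.List.pyIdx?]
  have h1 : innerA [1] [1] = [1] := by decide
  have h2 : ([1] : List Int) = pows 1 := by simp [pows]
  rw [h0, h1, h2, loop_eq n.toNat n (pows 1) 0 (by
    intro x hx
    simp [pows] at hx
    omega)]
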